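-- pv_equiv track=rewrite | github.com/pythagoreantree/python-Yandex-1 | 2_8_multiply_3.py | find_max3
-- ===== SOURCE A (Python) =====
-- def define_maxxs(a, b, c):
--     if a > b:
--         a, b = b, a
--     if b > c:
--         b, c = c, b
--     if a > b:
--         a, b = b, a
--     return c, b, a
--
-- def find_max3(arr):
--     lmax1, lmax2, lmax3 = define_maxxs(arr[0], arr[1], arr[2])
--     for i in range(3, len(arr)):
--         if arr[i] > lmax1:
--             lmax3 = lmax2
--             lmax2 = lmax1
--             lmax1 = arr[i]
--         elif arr[i] > lmax2:
--             lmax3 = lmax2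
--             lmax2 = arr[i]
--         elif arr[i] > lmax3:
--             lmax3 = arr[i]
--     return lmax1, lmax2, lmax3
-- ===== SOURCE B (Python) =====
-- def find_max3(arr):
--     s = sorted(arr, reverse=True)
--     return s[0], s[1], s[2]
-- ===== Notes on version B (the rewrite author's own statement) =====
-- stated objective: idiomatic
-- what changed: Replaces the three-variable streaming tracker (initial sort of the first three plus a cascading if/elif update per element) with sort-descending-then-take-first-three.
import Mathlib
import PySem

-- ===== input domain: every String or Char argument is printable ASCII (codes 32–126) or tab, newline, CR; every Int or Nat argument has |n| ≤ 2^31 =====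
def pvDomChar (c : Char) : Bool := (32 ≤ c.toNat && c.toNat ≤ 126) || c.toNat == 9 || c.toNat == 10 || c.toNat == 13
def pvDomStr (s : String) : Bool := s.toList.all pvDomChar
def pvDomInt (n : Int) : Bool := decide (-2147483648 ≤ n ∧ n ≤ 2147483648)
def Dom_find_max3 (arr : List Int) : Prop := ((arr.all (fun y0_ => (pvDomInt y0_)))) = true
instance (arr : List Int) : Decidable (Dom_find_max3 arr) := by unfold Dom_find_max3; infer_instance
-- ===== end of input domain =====

-- B replaces A's three-variable streaming tracker with sorted(arr, reverse=True) and takes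
-- the first three elements (same IndexError on lists shorter than 3); objective: idiomatic.

-- ===== PORT A =====
-- a, b, c are reassigned by the swap statements; modelled by shadowing lets.
def define_maxxs (a b c : Int) : Int × Int × Int :=
  let (a, b) := if a > b then (b, a) else (a, b)
  let (b, c) := if b > c then (c, b) else (b, c)
  let (a, b) := if a > b then (b, a) else (a, b)
  (c, b, a)

-- arr[0], arr[1], arr[2] raise IndexError when len(arr) < 3 (excluded by Pre_);
-- the loop 'for i in range(3, len(arr))' reads exactly the elements of arr[3:] = rest.
def find_max3 (arr : List Int) : Int × Int × Int :=
  match arr with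
  | x0 :: x1 :: x2 :: rest =>
    rest.foldl
      (fun s ai =>
        let (lmax1, lmax2, lmax3) := s
        if ai > lmax1 then (ai, lmax1, lmax2)
        else if ai > lmax2 then (lmax1, ai, lmax2)
        else if ai > lmax3 then (lmax1, lmax2, ai)
        else (lmax1, lmax2, lmax3))
      (define_maxxs x0 x1 x2)
  | _ => (0, 0, 0)  -- IndexError: outside Pre_

-- ===== PORT B =====
-- s = sorted(arr, reverse=True); return s[0], s[1], s[2]  (s[2] raises IndexError for len < 3)
def find_max3_alt (arr : List Int) : Int × Int × Int :=
  let s := PySem.List.sorted arr (fun x => x) true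
  match PySem.List.pyGet? s 0, PySem.List.pyGet? s 1, PySem.List.pyGet? s 2 with
  | some a, some b, some c => (a, b, c)
  | _, _, _ => (0, 0, 0)  -- IndexError: outside Pre_

-- ===== PRECONDITION & SPEC =====
-- Both Pythons raise IndexError on lists with fewer than 3 elements.
def Pre_find_max3 (arr : List Int) : Prop := 3 ≤ arr.length
instance (arr : List Int) : Decidable (Pre_find_max3 arr) := by unfold Pre_find_max3; infer_instance
def pvWitness_find_max3 : List Int := [5, 1, 4, 2, 2]

def Spec_find_max3 (arr : List Int) (out : Int × Int × Int) : Prop := out = find_max3_alt arr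
instance (arr : List Int) (out : Int × Int × Int) : Decidable (Spec_find_max3 arr out) := by unfold Spec_find_max3; infer_instance

-- ===== CLAIM (what is proved, stated in full; the proofs are below) =====
def Claim_equal_find_max3 : Prop := ∀ (arr : List Int), Dom_find_max3 arr → Pre_find_max3 arr → Spec_find_max3 arr (find_max3 arr)

-- ===== LEMMAS AND PROOFS =====

-- Proof-side helpers: the body of A's loop, 'first three elements', and descending sort.
def pvStep (s : Int × Int × Int) (ai : Int) : Int × Int × Int :=
  let (lmax1, lmax2, lmax3) := s
  if ai > lmax1 then (ai, lmax1, lmax2)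
  else if ai > lmax2 then (lmax1, ai, lmax2)
  else if ai > lmax3 then (lmax1, lmax2, ai)
  else (lmax1, lmax2, lmax3)

def pvFirst3 (s : List Int) : Int × Int × Int :=
  match s with
  | a :: b :: c :: _ => (a, b, c)
  | _ => (0, 0, 0)

def pvSortD (u : List Int) : List Int := PySem.List.sorted u (fun x => x) true

lemma sortD_append_singleton (u : List Int) (x : Int) :
    pvSortD (u ++ [x]) = PySem.List.insertBy (fun a b => decide (b < a)) x (pvSortD u) := by
  simp [pvSortD, PySem.List.sorted_rev_eq_foldl_insertBy, List.foldl_append]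

-- One element more: inserting x into the descending sort acts on the first three
-- exactly as A's cascading if/elif step does.
lemma step_ins (u : List Int) (x : Int) (h : 3 ≤ u.length) :
    pvFirst3 (pvSortD (u ++ [x])) = pvStep (pvFirst3 (pvSortD u)) x := by
  rw [sortD_append_singleton]
  have hlen : (pvSortD u).length = u.length := by
    simpa [pvSortD] using (PySem.List.sorted_perm u (fun x => x) true).length_eq
  have hpw : (pvSortD u).Pairwise (fun a b => b ≤ a) := by
    simpa [pvSortD] using PySem.List.sorted_pairwise_rev u (fun x => x)
  match hs : pvSortD u with
  | [] | [_] | [_, _] => simp [hs] at hlen; omega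
  | t1 :: t2 :: t3 :: r =>
    rw [hs] at hpw
    have h21 : t2 ≤ t1 := by simp at hpw; tauto
    have h32 : t3 ≤ t2 := by simp at hpw; tauto
    simp only [PySem.List.insertBy, pvStep, pvFirst3]
    split_ifs <;> simp_all

-- Loop invariant: A's fold over the remaining elements tracks the first three
-- of the descending sort of everything seen so far.
lemma main_fold (l : List Int) : ∀ (u : List Int), 3 ≤ u.length →
    l.foldl pvStep (pvFirst3 (pvSortD u)) = pvFirst3 (pvSortD (u ++ l)) := by
  induction l with
  | nil => intro u h; simp
  | cons x l ih =>
    intro u h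
    have := ih (u ++ [x]) (by simp; omega)
    rw [List.foldl_cons, ← step_ins u x h, this, List.append_assoc]
    rfl

-- A's three-swap sort of the first three elements agrees with the descending sort.
lemma init_eq (x0 x1 x2 : Int) :
    define_maxxs x0 x1 x2 = pvFirst3 (pvSortD [x0, x1, x2]) := by
  simp only [define_maxxs, pvSortD, PySem.List.sorted_rev_eq_foldl_insertBy, List.foldl_cons,
    List.foldl_nil, PySem.List.insertBy, pvFirst3]
  split_ifs <;> simp_all [PySem.List.insertBy] <;> split_ifs <;> simp_all <;> omega

lemma alt_eq_first3 (arr : List Int) (h : 3 ≤ arr.length) :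
    find_max3_alt arr = pvFirst3 (pvSortD arr) := by
  have hlen : (pvSortD arr).length = arr.length := by
    simpa [pvSortD] using (PySem.List.sorted_perm arr (fun x => x) true).length_eq
  match hs : pvSortD arr with
  | [] | [_] | [_, _] => simp [hs] at hlen; omega
  | a :: b :: c :: t =>
    simp only [find_max3_alt]
    rw [show PySem.List.sorted arr (fun x => x) true = a :: b :: c :: t from hs]
    have h0 : (0 : Int) ≤ (t.length : Int) + 1 + 1 := by omega
    have h1 : (0 : Int) ≤ (t.length : Int) + 1 := by omega
    have h2 : (2 : Int) ≤ (t.length : Int) + 1 + 1 := by omega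
    simp [PySem.List.pyGet?, PySem.List.pyIdx?, pvFirst3, h0, h1, h2]

-- ===== VERDICT (by name: the statement is the Claim_ definition above) =====
theorem find_max3_spec : Claim_equal_find_max3 := by
  intro arr _ hpre
  unfold Spec_find_max3
  match arr, hpre with
  | x0 :: x1 :: x2 :: rest, hpre =>
    rw [alt_eq_first3 _ hpre]
    show rest.foldl pvStep (define_maxxs x0 x1 x2) = _
    rw [init_eq, main_fold rest [x0, x1, x2] (by simp)]
    rfl
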